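-- pv_equiv track=rewrite | github.com/pypi-data/pypi-mirror-270 | packages/BsSalary-Extractor/bssalary_extractor-1.3.8.tar.gz/bssalary_extractor-1.3.8/BsSalary_Extractor/functions.py | sort_digits_preserving_order
-- ===== SOURCE A (Python) =====
-- def sort_digits_preserving_order(strings):
--     sorted_strings = []
--
--     for s in strings:
--         words = s.split()
--         digit_words = [word for word in words if '.' in word and word.replace('.', '').replace(',', '').isdigit()]
--         non_digit_words = [word for word in words if word not in digit_words]
--
--         sorted_string = ' '.join(non_digit_words + digit_words)
--         sorted_strings.append(sorted_string)
--
--     return sorted_strings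
-- ===== SOURCE B (Python) =====
-- def sort_digits_preserving_order(strings):
--     return [
--         ' '.join(sorted(s.split(),
--                         key=lambda w: '.' in w and w.replace('.', '').replace(',', '').isdigit()))
--         for s in strings
--     ]
-- ===== Notes on version B (the rewrite author's own statement) =====
-- stated objective: idiomatic
-- what changed: Replaces the two filtering comprehensions plus list-membership re-scan and explicit accumulator loop by a single stable sort on a boolean key inside one list comprehension.
import Mathlib
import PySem

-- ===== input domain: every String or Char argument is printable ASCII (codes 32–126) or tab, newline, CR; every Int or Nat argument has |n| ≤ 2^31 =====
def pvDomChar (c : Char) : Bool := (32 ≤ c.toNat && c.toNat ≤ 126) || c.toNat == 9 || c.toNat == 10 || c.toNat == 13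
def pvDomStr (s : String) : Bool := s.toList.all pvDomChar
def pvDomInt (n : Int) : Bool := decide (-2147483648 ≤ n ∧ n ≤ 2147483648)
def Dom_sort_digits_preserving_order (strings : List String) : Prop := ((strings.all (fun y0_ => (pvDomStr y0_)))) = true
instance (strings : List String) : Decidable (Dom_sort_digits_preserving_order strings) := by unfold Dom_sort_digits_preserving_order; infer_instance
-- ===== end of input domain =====

-- B replaces A's two filtering passes + membership re-scan + accumulator loop by one stable sort
-- on a boolean key inside a single comprehension (objective: idiomatic; same cost).


-- ===== PORT A =====
-- '.' in word and word.replace('.', '').replace(',', '').isdigit()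
def pvIsDigitWord (word : String) : Bool :=
  PySem.Str.isIn "." word &&
    PySem.Str.strIsdigit (PySem.Str.replace (PySem.Str.replace word "." "") "," "")

def sort_digits_preserving_order (strings : List String) : List String :=
  -- for s in strings: … ; sorted_strings.append(…)
  strings.foldl
    (fun sorted_strings s =>
      let words := PySem.Str.split₀ s
      let digit_words := words.filter (fun word => pvIsDigitWord word)
      let non_digit_words := words.filter (fun word => !(digit_words.contains word))
      sorted_strings ++ [PySem.Str.join " " (non_digit_words ++ digit_words)])
    []

-- ===== PORT B =====
-- sorted(words, key=lambda w: <bool>): the bool key is ported as an Int 0/1 key (same order)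
def sort_digits_preserving_order_alt (strings : List String) : List String :=
  strings.map (fun s =>
    PySem.Str.join " "
      (PySem.List.sorted (PySem.Str.split₀ s)
        (fun w =>
          if PySem.Str.isIn "." w &&
              PySem.Str.strIsdigit (PySem.Str.replace (PySem.Str.replace w "." "") "," "")
          then (1 : Int) else 0)
        false))

-- ===== PRECONDITION & SPEC =====
def Spec_sort_digits_preserving_order (strings : List String) (out : List String) : Prop := out = sort_digits_preserving_order_alt strings
instance (strings : List String) (out : List String) : Decidable (Spec_sort_digits_preserving_order strings out) := by unfold Spec_sort_digits_preserving_order; infer_instance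

-- ===== CLAIM (what is proved, stated in full; the proofs are below) =====
def Claim_equal_sort_digits_preserving_order : Prop := ∀ (strings : List String), Dom_sort_digits_preserving_order strings → Spec_sort_digits_preserving_order strings (sort_digits_preserving_order strings)

-- ===== LEMMAS AND PROOFS =====

-- the 0/1 key used by B's sort
def pvKey (w : String) : Int := if pvIsDigitWord w then 1 else 0

lemma pvKey_lt_false (x y : String) (hx : pvIsDigitWord x = true) :
    decide (pvKey x < pvKey y) = false := by
  simp [pvKey, hx]; split_ifs <;> omega

lemma pvKey_lt_true (x y : String) (hx : pvIsDigitWord x = false) (hy : pvIsDigitWord y = true) :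
    decide (pvKey x < pvKey y) = true := by
  simp [pvKey, hx, hy]

-- skip over a prefix on which 'before' is false, then insert in front of a hit
lemma insertBy_skip (before : String → String → Bool) (x : String) (fs : List String)
    (y : String) (ts : List String)
    (hf : ∀ z ∈ fs, before x z = false) (hy : before x y = true) :
    PySem.List.insertBy before x (fs ++ y :: ts) = fs ++ x :: y :: ts := by
  induction fs with
  | nil => simp [PySem.List.insertBy, hy]
  | cons f fs ih =>
    have hfx : before x f = false := hf f (by simp)
    simp only [List.cons_append]
    unfold PySem.List.insertBy
    simp only [hfx]
    simpa using ih (fun z hz => hf z (by simp [hz]))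

-- the stable-sort loop with a 0/1 key partitions: falses (in order) then trues (in order)
lemma foldl_insertBy_partition (xs fs ts : List String)
    (hf : ∀ y ∈ fs, pvIsDigitWord y = false) (ht : ∀ y ∈ ts, pvIsDigitWord y = true) :
    xs.foldl (fun acc x => PySem.List.insertBy (fun a b => decide (pvKey a < pvKey b)) x acc)
        (fs ++ ts)
      = (fs ++ xs.filter (fun w => !pvIsDigitWord w)) ++ (ts ++ xs.filter pvIsDigitWord) := by
  induction xs generalizing fs ts with
  | nil => simp
  | cons x xs ih =>
    by_cases hx : pvIsDigitWord x = true
    · have hins : PySem.List.insertBy (fun a b => decide (pvKey a < pvKey b)) x (fs ++ ts)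
          = (fs ++ ts) ++ [x] :=
        PySem.List.insertBy_of_forall_not_before _ x _ (fun y _ => pvKey_lt_false x y hx)
      have := ih fs (ts ++ [x]) hf (by intro y hy; rcases List.mem_append.1 hy with h | h
                                       · exact ht y h
                                       · simp at h; subst h; exact hx)
      simp only [List.foldl_cons, hins, List.append_assoc] at this ⊢
      rw [this]
      simp [List.filter_cons, hx]
    · have hx' : pvIsDigitWord x = false := by simpa using hx
      have hins : PySem.List.insertBy (fun a b => decide (pvKey a < pvKey b)) x (fs ++ ts)
          = (fs ++ [x]) ++ ts := by
        cases ts with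
        | nil =>
          simpa using PySem.List.insertBy_of_forall_not_before
            (fun a b => decide (pvKey a < pvKey b)) x fs
            (fun y hy => by simp [pvKey, hx', hf y hy])
        | cons t ts' =>
          have := insertBy_skip (fun a b => decide (pvKey a < pvKey b)) x fs t ts'
            (fun z hz => by simp [pvKey, hx', hf z hz])
            (pvKey_lt_true x t hx' (ht t (by simp)))
          simpa using this
      have := ih (fs ++ [x]) ts
        (by intro y hy; rcases List.mem_append.1 hy with h | h
            · exact hf y h
            · simp at h; subst h; exact hx') ht
      simp only [List.foldl_cons, hins] at this ⊢
      rw [this]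
      simp [hx']

-- B's sort on one word list is A's partition of it
lemma sorted_eq_partition (words : List String) :
    PySem.List.sorted words pvKey false
      = words.filter (fun w => !pvIsDigitWord w) ++ words.filter pvIsDigitWord := by
  rw [PySem.List.sorted_eq_foldl_insertBy]
  simpa using foldl_insertBy_partition words [] [] (by simp) (by simp)

-- 'word not in digit_words' over the words is the complement filter
lemma non_digit_filter (words : List String) :
    words.filter (fun word => !((words.filter (fun w => pvIsDigitWord w)).contains word))
      = words.filter (fun w => !pvIsDigitWord w) := by
  apply List.filter_congr
  intro w hw
  by_cases h : pvIsDigitWord w = true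
  · simp [List.mem_filter, hw, h]
  · simp [List.mem_filter, h]

-- ===== VERDICT (by name: the statement is the Claim_ definition above) =====
theorem sort_digits_preserving_order_spec : Claim_equal_sort_digits_preserving_order := by
  intro strings _
  unfold Spec_sort_digits_preserving_order sort_digits_preserving_order sort_digits_preserving_order_alt
  rw [PySem.List.foldl_append_singleton_eq_map]
  simp only [List.nil_append]
  apply List.map_congr_left
  intro s _
  have hkey : (fun w => if PySem.Str.isIn "." w &&
        PySem.Str.strIsdigit (PySem.Str.replace (PySem.Str.replace w "." "") "," "")
      then (1 : Int) else 0) = pvKey := by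
    funext w; simp [pvKey, pvIsDigitWord]
  rw [hkey, sorted_eq_partition, non_digit_filter]
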